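-- pv_equiv track=rewrite | github.com/yaeoni/algorithmStudy | programmers/60058.py | solution
-- ===== SOURCE A (Python) =====
-- def isRight(p):
--     r = 0
--
--     for c in p:
--         if c =='(': r +=1
--         else: r -= 1
--
--         if r < 0: return False
--
--     return True
--
-- def solution(p):
--     answer = ''
--
--     # 1
--     if(len(p) == 0): return ""
--     # 2
--     if(isRight(p)): return p
--     splitIdx = 0
--     r = 0
--     for idx, c in enumerate(p):
--
--         if c == '(': r += 1
--         else: r -= 1
--
--         if(r == 0):
--             splitIdx = idx
--             break
--
--     u = p[:splitIdx+1]
--     v = p[splitIdx+1:]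
--
--     # 3-1
--     if(isRight(u)): return u + solution(v)
--
--     # u 뒤집기 -> replace (,) 가 이미 바뀐 부분이 또 바뀔 수 있으니까 다른 문자로 바꿔놓고 바꾸기
--     u = u.replace('(', '0').replace(')','(').replace('0', ')')
--
--     return "(" + solution(v) + ")" + u[1:len(u)-1]
-- ===== SOURCE B (Python) =====
-- def solution(p):
--     n = len(p)
--     left = []   # pieces of the answer, left to right
--     right = []  # closing pieces, popped LIFO at the end
--     i = 0
--     while i < n:
--         # end of the first primitive chunk starting at i: first j with zero balance, else i+1
--         bal = 0
--         cut = i + 1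
--         for j in range(i, n):
--             bal += 1 if p[j] == '(' else -1
--             if bal == 0:
--                 cut = j + 1
--                 break
--         u = p[i:cut]
--         i = cut
--         if u[0] == '(':
--             left.append(u)
--         else:
--             flipped = u.replace('(', '0').replace(')', '(').replace('0', ')')
--             left.append('(')
--             right.append(')' + flipped[1:len(flipped) - 1])
--     return ''.join(left) + ''.join(reversed(right))
-- ===== Notes on version B (the rewrite author's own statement) =====
-- stated objective: alternative
-- what changed: A's recursion (which re-checks the remaining string with isRight at every level and assembles the result by nested string concatenation) is replaced by an iterative left-to-right loop over primitive chunks that decides keep/flip by the chunk's first character and assembles the answer once from two piece lists.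
import Mathlib
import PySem

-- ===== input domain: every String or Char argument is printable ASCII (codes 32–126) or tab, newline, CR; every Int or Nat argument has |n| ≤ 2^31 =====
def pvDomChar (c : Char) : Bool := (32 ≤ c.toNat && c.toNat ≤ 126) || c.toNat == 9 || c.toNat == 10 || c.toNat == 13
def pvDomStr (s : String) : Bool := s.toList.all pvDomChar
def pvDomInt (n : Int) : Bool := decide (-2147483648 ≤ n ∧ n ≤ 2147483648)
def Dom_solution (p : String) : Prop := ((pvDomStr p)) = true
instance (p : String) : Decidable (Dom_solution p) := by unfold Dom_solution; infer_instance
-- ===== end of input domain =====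

-- B replaces A's recursion (which rescans the rest of the string with isRight at every
-- level) by one left-to-right pass over primitive chunks with two output stacks; same
-- return value on every input.

-- shared small helper: both Pythons contain the identical three-step replace chain
-- u.replace('(', '0').replace(')','(').replace('0', ')')
def flip3 (u : List Char) : List Char :=
  PySem.Chars.replace (PySem.Chars.replace (PySem.Chars.replace u ['('] ['0']) [')'] ['(']) ['0'] [')']

-- ===== PORT A =====
-- isRight: running counter, early False on r < 0
def isRightGo (cs : List Char) (r : Int) : Bool :=
  match cs with
  | [] => true
  | c :: t =>
    let r' := if c = '(' then r + 1 else r - 1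
    if r' < 0 then false else isRightGo t r'

-- the 'for idx, c in enumerate(p): … if r == 0: splitIdx = idx; break' loop;
-- none = the loop fell through (splitIdx keeps its initial 0)
def findSplit (cs : List Char) (r : Int) (idx : Nat) : Option Nat :=
  match cs with
  | [] => none
  | c :: t =>
    let r' := if c = '(' then r + 1 else r - 1
    if r' = 0 then some idx else findSplit t r' (idx + 1)

-- termination helper for the port (cited in decreasing_by)
theorem solA_dec (cs : List Char) (h : ¬ cs = []) (si : Nat) :
    (PySem.List.slice cs (some ((si : Int) + 1)) none).length < cs.length := by
  have h1 : ((si : Int) + 1) = (((si + 1 : Nat) : Int)) := by push_cast; ring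
  rw [h1, PySem.List.slice_from_natCast]
  cases cs with
  | nil => exact absurd rfl h
  | cons c t => simp

def solutionA (cs : List Char) : List Char :=
  if h : cs = [] then []
  else if isRightGo cs 0 then cs
  else
    let si := (findSplit cs 0 0).getD 0
    let u := PySem.List.slice cs none (some ((si : Int) + 1))      -- p[:splitIdx+1]
    let v := PySem.List.slice cs (some ((si : Int) + 1)) none      -- p[splitIdx+1:]
    if isRightGo u 0 then u ++ solutionA v
    else
      let u' := flip3 u
      -- "(" + solution(v) + ")" + u[1:len(u)-1]
      '(' :: (solutionA v ++ ')' :: PySem.List.slice u' (some 1) (some ((PySem.Chars.len u' : Int) - 1)))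
termination_by cs.length
decreasing_by
  all_goals exact solA_dec cs h _

def solution (p : String) : String := String.mk (solutionA p.toList)

-- ===== PORT B =====
-- the inner 'for j in range(i, n): … if bal == 0: cut = j + 1; break' loop; cut starts at i+1
def findCutGo (p : List Char) (n j : Nat) (bal : Int) (cut : Nat) : Nat :=
  if j < n then
    match PySem.List.pyGet? p (j : Int) with
    | none => cut          -- unreachable: j < n = len(p)
    | some c =>
      let bal' := bal + (if c = '(' then 1 else -1)
      if bal' = 0 then j + 1 else findCutGo p n (j + 1) bal' cut
  else cut
termination_by n - j

-- the 'while i < n' loop with the two output stacks; i grows by at least 1 per pass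
-- (findCutGo_min), so a fuel of n - i ≤ fuel guards totality without changing the computation
-- (the fuel-exhausted branch is exactly the loop-exit result, reached only when i ≥ n)
def solBGo (p : List Char) (n : Nat) (fuel i : Nat) (left right : List (List Char)) : List Char :=
  match fuel with
  | 0 => PySem.Chars.join [] left ++ PySem.Chars.join [] right.reverse
  | fuel + 1 =>
    if i < n then
      let cut := findCutGo p n i 0 (i + 1)
      let u := PySem.List.slice p (some (i : Int)) (some (cut : Int))      -- p[i:cut]
      if PySem.List.pyGet? u 0 = some '(' then                             -- u[0] == '(' (u nonempty: cut ≥ i+1)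
        solBGo p n fuel cut (left ++ [u]) right
      else
        let flipped := flip3 u
        solBGo p n fuel cut (left ++ [['(']])
          (right ++ [')' :: PySem.List.slice flipped (some 1) (some ((PySem.Chars.len flipped : Int) - 1))])
    else PySem.Chars.join [] left ++ PySem.Chars.join [] right.reverse

def solution_alt (p : String) : String :=
  String.mk (solBGo p.toList p.toList.length p.toList.length 0 [] [])   -- n = len(p); Chars.len_eq

-- ===== PRECONDITION & SPEC =====
def Spec_solution (p : String) (out : String) : Prop := out = solution_alt p
instance (p : String) (out : String) : Decidable (Spec_solution p out) := by unfold Spec_solution; infer_instance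

-- ===== CLAIM (what is proved, stated in full; the proofs are below) =====
def Claim_equal_solution : Prop := ∀ (p : String), Dom_solution p → Spec_solution p (solution p)

-- ===== LEMMAS AND PROOFS =====

-- the common recursive shape both programs compute (proof-side only)
def midFlip (u : List Char) : List Char :=
  let u' := flip3 u
  PySem.List.slice u' (some 1) (some ((PySem.Chars.len u' : Int) - 1))

def Rfun (cs : List Char) : List Char :=
  if h : cs = [] then []
  else
    let k := match findSplit cs 0 0 with | some s => s + 1 | none => 1
    if cs.headI = '(' then cs.take k ++ Rfun (cs.drop k)
    else '(' :: (Rfun (cs.drop k) ++ ')' :: midFlip (cs.take k))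
termination_by cs.length
decreasing_by
  all_goals
    have hk : 1 ≤ k := by
      simp only [k]; cases findSplit cs 0 0 <;> simp
    simp only [List.length_drop]
    cases cs with
    | nil => exact absurd rfl h
    | cons c t => simp; omega

theorem head_of_isRight (c : Char) (t : List Char) (h : isRightGo (c :: t) 0 = true) : c = '(' := by
  by_cases hc : c = '(' <;> simp [isRightGo, hc] at h ⊢

theorem pos_lower (t : List Char) : ∀ (r : Int) (idx : Nat),
    isRightGo t r = true → findSplit t r idx = none → isRightGo t (r - 1) = true := by
  induction t with
  | nil => intro r idx _ _; rfl
  | cons c t ih =>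
    intro r idx hr hf
    by_cases hc : c = '('
    · simp only [isRightGo, findSplit, hc, if_true] at hr hf ⊢
      have h1 : ¬ r + 1 < 0 := by by_contra hx; simp [hx] at hr
      simp only [if_neg h1] at hr
      have h2 : ¬ r + 1 = 0 := by by_contra hx; simp [hx] at hf
      simp only [if_neg h2] at hf
      have h3 : ¬ r - 1 + 1 < 0 := by omega
      rw [if_neg h3]
      have he : r - 1 + 1 = r + 1 - 1 := by ring
      rw [he]
      exact ih (r + 1) (idx + 1) hr hf
    · simp only [isRightGo, findSplit, hc, if_false] at hr hf ⊢
      have h1 : ¬ r - 1 < 0 := by by_contra hx; simp [hx] at hr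
      simp only [if_neg h1] at hr
      have h2 : ¬ r - 1 = 0 := by by_contra hx; simp [hx] at hf
      simp only [if_neg h2] at hf
      have h3 : ¬ r - 1 - 1 < 0 := by omega
      rw [if_neg h3]
      exact ih (r - 1) (idx + 1) hr hf

theorem findSplit_shift (cs : List Char) : ∀ (r : Int) (idx : Nat),
    findSplit cs r idx = (findSplit cs r 0).map (· + idx) := by
  induction cs with
  | nil => intro r idx; rfl
  | cons c t ih =>
    intro r idx
    simp only [findSplit]
    by_cases h0 : (if c = '(' then r + 1 else r - 1) = 0
    · simp [h0]
    · simp only [if_neg h0, ih _ (idx + 1), ih _ 1, Option.map_map]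
      congr 1
      funext s
      simp; omega

theorem FS_drop (cs : List Char) : ∀ (r : Int) (s : Nat),
    findSplit cs r 0 = some s → isRightGo cs r = true → isRightGo (cs.drop (s + 1)) 0 = true := by
  induction cs with
  | nil => intro r s h _; simp [findSplit] at h
  | cons c t ih =>
    intro r s hf hr
    simp only [findSplit] at hf
    simp only [isRightGo] at hr
    have h1 : ¬ (if c = '(' then r + 1 else r - 1) < 0 := by by_contra hx; simp [hx] at hr
    simp only [if_neg h1] at hr
    by_cases h0 : (if c = '(' then r + 1 else r - 1) = 0
    · simp only [if_pos h0] at hf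
      obtain rfl : s = 0 := by simpa using hf.symm
      simpa [h0] using hr
    · rw [if_neg h0, findSplit_shift t _ 1] at hf
      cases hs0 : findSplit t (if c = '(' then r + 1 else r - 1) 0 with
      | none => rw [hs0] at hf; simp at hf
      | some s0 =>
        rw [hs0] at hf
        simp only [Option.map_some, Option.some_inj] at hf
        have hd : (c :: t).drop (s + 1) = t.drop (s0 + 1) := by
          rw [List.drop_succ_cons, show s = s0 + 1 from hf.symm]
        rw [hd]
        exact ih _ s0 hs0 hr

theorem G2 (cs : List Char) : ∀ (r : Int) (s : Nat),
    findSplit cs r 0 = some s → 1 ≤ r → isRightGo (cs.take (s + 1)) r = true := by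
  induction cs with
  | nil => intro r s h _; simp [findSplit] at h
  | cons c t ih =>
    intro r s hf hr
    by_cases hc : c = '(' <;>
      simp only [findSplit, hc, if_true, if_false] at hf
    · by_cases h0 : r + 1 = 0
      · omega
      · rw [if_neg h0, findSplit_shift t _ 1] at hf
        cases hs0 : findSplit t (r + 1) 0 with
        | none => rw [hs0] at hf; simp at hf
        | some s0 =>
          rw [hs0] at hf
          simp only [Option.map_some, Option.some_inj] at hf
          have ht := ih (r + 1) s0 hs0 (by omega)
          have hd : (c :: t).take (s + 1) = c :: t.take (s0 + 1) := by
            rw [List.take_succ_cons, show s = s0 + 1 from hf.symm]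
          rw [hd]
          simp only [isRightGo, hc, if_true, if_neg (show ¬ r + 1 < 0 by omega)]
          exact ht
    · by_cases h0 : r - 1 = 0
      · simp only [if_pos h0, Option.some_inj] at hf
        obtain rfl : s = 0 := hf.symm
        simp only [List.take_succ_cons, List.take_zero, isRightGo, hc, if_false]
        rw [if_neg (show ¬ r - 1 < 0 by omega)]
      · rw [if_neg h0, findSplit_shift t _ 1] at hf
        cases hs0 : findSplit t (r - 1) 0 with
        | none => rw [hs0] at hf; simp at hf
        | some s0 =>
          rw [hs0] at hf
          simp only [Option.map_some, Option.some_inj] at hf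
          have ht := ih (r - 1) s0 hs0 (by omega)
          have hd : (c :: t).take (s + 1) = c :: t.take (s0 + 1) := by
            rw [List.take_succ_cons, show s = s0 + 1 from hf.symm]
          rw [hd]
          simp only [isRightGo, hc, if_false, if_neg (show ¬ r - 1 < 0 by omega)]
          exact ht

theorem isRight_single (c : Char) : isRightGo [c] 0 = true ↔ c = '(' := by
  by_cases hc : c = '(' <;> simp [isRightGo, hc]

-- isRightGo u 0 for the primitive chunk u is decided by its first character
theorem isRight_take (c : Char) (t : List Char) (s : Nat)
    (hf : findSplit (c :: t) 0 0 = some s) :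
    isRightGo ((c :: t).take (s + 1)) 0 = true ↔ c = '(' := by
  constructor
  · intro h
    rcases s with _ | s <;> exact head_of_isRight _ _ h
  · intro hc
    subst hc
    simp only [findSplit, if_true, zero_add] at hf
    rw [if_neg (by norm_num : ¬ (1 : Int) = 0), findSplit_shift t _ 1] at hf
    cases hs0 : findSplit t 1 0 with
    | none => rw [hs0] at hf; simp at hf
    | some s0 =>
      rw [hs0] at hf
      simp only [Option.map_some, Option.some_inj] at hf
      have ht := G2 t 1 s0 hs0 le_rfl
      have hd : ('(' :: t).take (s + 1) = '(' :: t.take (s0 + 1) := by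
        rw [List.take_succ_cons, show s = s0 + 1 from hf.symm]
      rw [hd]
      simp only [isRightGo, if_true, zero_add]
      rw [if_neg (by norm_num : ¬ (1 : Int) < 0)]
      exact ht

theorem R_right_fuel (N : Nat) : ∀ (cs : List Char), cs.length ≤ N →
    isRightGo cs 0 = true → Rfun cs = cs := by
  induction N with
  | zero =>
    intro cs hlen _
    obtain rfl : cs = [] := List.eq_nil_of_length_eq_zero (by omega)
    rw [Rfun]; simp
  | succ N ih =>
    intro cs hlen h
    cases cs with
    | nil => rw [Rfun]; simp
    | cons c t =>
      obtain rfl : c = '(' := head_of_isRight _ _ h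
      rw [Rfun]
      simp only [reduceCtorEq, dite_false, List.headI, reduceIte]
      cases hf : findSplit ('(' :: t) 0 0 with
      | some s =>
        have hv := FS_drop ('(' :: t) 0 s hf h
        rw [ih _ (by simp at hlen ⊢; omega) hv]
        exact List.take_append_drop _ _
      | none =>
        have hv : isRightGo t 0 = true := by
          simp only [isRightGo, reduceIte, zero_add] at h
          rw [if_neg (by norm_num : ¬ (1 : Int) < 0)] at h
          simp only [findSplit, reduceIte, zero_add] at hf
          rw [if_neg (by norm_num : ¬ (1 : Int) = 0)] at hf
          have := pos_lower t 1 1 h hf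
          simpa using this
        simp only [List.take_succ_cons, List.take_zero, List.drop_succ_cons, List.drop_zero]
        rw [ih t (by simpa using hlen) hv]
        rfl

theorem R_right (cs : List Char) (h : isRightGo cs 0 = true) : Rfun cs = cs :=
  R_right_fuel cs.length cs le_rfl h

theorem slice_to_succ (cs : List Char) (s : Nat) :
    PySem.List.slice cs none (some ((s : Int) + 1)) = cs.take (s + 1) := by
  have h1 : ((s : Int) + 1) = (((s + 1 : Nat) : Int)) := by push_cast; ring
  rw [h1, PySem.List.slice_to_natCast]

theorem slice_from_succ (cs : List Char) (s : Nat) :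
    PySem.List.slice cs (some ((s : Int) + 1)) none = cs.drop (s + 1) := by
  have h1 : ((s : Int) + 1) = (((s + 1 : Nat) : Int)) := by push_cast; ring
  rw [h1, PySem.List.slice_from_natCast]

theorem solutionA_eq_Rfun_fuel (N : Nat) : ∀ (cs : List Char), cs.length ≤ N →
    solutionA cs = Rfun cs := by
  induction N with
  | zero =>
    intro cs hlen
    obtain rfl : cs = [] := List.eq_nil_of_length_eq_zero (by omega)
    rw [solutionA, Rfun]
    simp
  | succ N ih =>
    intro cs hlen
    cases cs with
    | nil => rw [solutionA, Rfun]; simp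
    | cons c t =>
      by_cases hr : isRightGo (c :: t) 0 = true
      · rw [solutionA]
        simp only [List.cons_ne_self, dite_false, hr, if_true]
        exact (R_right _ hr).symm
      · rw [solutionA, Rfun]
        simp only [List.cons_ne_self, dite_false, hr, if_false, Bool.false_eq_true]
        cases hf : findSplit (c :: t) 0 0 with
        | some s =>
          simp only [Option.getD_some, slice_to_succ, slice_from_succ, List.headI]
          have hiff := isRight_take c t s hf
          have hlen2 : ((c :: t).drop (s + 1)).length ≤ N := by
            simp at hlen ⊢; omega
          rw [ih _ hlen2]
          by_cases hc : c = '('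
          · rw [if_pos (hiff.mpr hc), if_pos hc]
          · rw [if_neg (fun hx => hc (hiff.mp hx)), if_neg hc]
            simp [midFlip]
        | none =>
          have hu : (c :: t).take (0 + 1) = [c] := by simp
          have hv : (c :: t).drop (0 + 1) = t := by simp
          simp only [Option.getD_none, slice_to_succ, slice_from_succ, List.headI]
          rw [hu, hv, ih t (by simpa using hlen)]
          by_cases hc : c = '('
          · rw [if_pos ((isRight_single c).mpr hc), if_pos hc]
          · rw [if_neg (fun hx => hc ((isRight_single c).mp hx)), if_neg hc]
            simp [midFlip]

theorem flat_eq (l : List (List Char)) : PySem.Chars.join [] l = l.flatten := by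
  match l with
  | [] => simp [PySem.Chars.join_nil]
  | [p] => simp [PySem.Chars.join_singleton]
  | p :: q :: rest => rw [PySem.Chars.join_cons_cons, flat_eq (q :: rest)]; simp

theorem findCutGo_eq (p : List Char) (n : Nat) (hn : n = p.length) :
    ∀ (M j : Nat) (bal : Int) (cut : Nat), n - j ≤ M → j ≤ n →
    findCutGo p n j bal cut =
      (match findSplit (p.drop j) bal j with | some s => s + 1 | none => cut) := by
  intro M
  induction M with
  | zero =>
    intro j bal cut hM hj
    have hj' : j = n := by omega
    subst hj' hn
    rw [findCutGo]
    simp [findSplit]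
  | succ M ih =>
    intro j bal cut hM hj
    by_cases hlt : j < n
    · obtain ⟨c, t, hd⟩ : ∃ c t, p.drop j = c :: t := by
        cases hdd : p.drop j with
        | nil => exfalso; have := congrArg List.length hdd; simp at this; omega
        | cons c t => exact ⟨c, t, rfl⟩
      have hget : PySem.List.pyGet? p (j : Int) = some c := by
        have : p[j]? = some c := by
          rw [← List.head?_drop, hd]; rfl
        simp [pysem, this]
      rw [findCutGo]
      simp only [if_pos hlt, hget]
      have ht : t = p.drop (j + 1) := by
        have := congrArg List.tail hd
        simpa [List.tail_drop] using this.symm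
      have hstep : (bal + if c = '(' then 1 else -1) = (if c = '(' then bal + 1 else bal - 1) := by
        by_cases hc : c = '(' <;> simp [hc] <;> ring
      rw [hd]
      simp only [findSplit, hstep]
      by_cases h0 : (if c = '(' then bal + 1 else bal - 1) = 0
      · simp [h0]
      · simp only [if_neg h0]
        rw [ih (j + 1) _ cut (by omega) (by omega), ← ht]
    · have hj' : j = n := by omega
      subst hj' hn
      rw [findCutGo]
      simp [findSplit]

theorem step_eq (p : List Char) (n i : Nat) (hn : n = p.length) (hi : i < n) :
    findCutGo p n i 0 (i + 1) =
      i + (match findSplit (p.drop i) 0 0 with | some s => s + 1 | none => 1) := by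
  rw [findCutGo_eq p n hn (n - i) i 0 (i + 1) le_rfl (by omega),
    findSplit_shift (p.drop i) 0 i]
  cases findSplit (p.drop i) 0 0 with
  | none => simp
  | some s =>
    simp
    have h2 : ∀ a b : Nat, a + b + 1 = b + (a + 1) := by intro a b; omega
    exact h2 s i

theorem Rfun_step (d : List Char) (c : Char) (t : List Char) (hd : d = c :: t) :
    Rfun d =
      (if c = '(' then d.take (match findSplit d 0 0 with | some s => s + 1 | none => 1) ++ Rfun (d.drop (match findSplit d 0 0 with | some s => s + 1 | none => 1))
       else '(' :: (Rfun (d.drop (match findSplit d 0 0 with | some s => s + 1 | none => 1)) ++ ')' :: midFlip (d.take (match findSplit d 0 0 with | some s => s + 1 | none => 1)))) := by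
  rw [Rfun]
  have hne : ¬ d = [] := by rw [hd]; simp
  have hh : d.headI = c := by rw [hd]; rfl
  simp only [dif_neg hne, hh]

theorem solBGo_inv (p : List Char) (n : Nat) (hn : n = p.length) :
    ∀ (fuel i : Nat) (left right : List (List Char)), n - i ≤ fuel →
    solBGo p n fuel i left right =
      PySem.Chars.join [] left ++ Rfun (p.drop i) ++ PySem.Chars.join [] right.reverse := by
  intro fuel
  induction fuel with
  | zero =>
    intro i left right hM
    have hd : p.drop i = [] := by
      apply List.drop_eq_nil_of_le; omega
    rw [solBGo, hd, Rfun]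
    simp
  | succ M ih =>
    intro i left right hM
    rw [solBGo]
    by_cases hi : i < n
    · rw [if_pos hi]
      obtain ⟨c, t, hd⟩ : ∃ c t, p.drop i = c :: t := by
        cases hdd : p.drop i with
        | nil => exfalso; have := congrArg List.length hdd; simp at this; omega
        | cons c t => exact ⟨c, t, rfl⟩
      have hcut := step_eq p n i hn hi
      have hR := Rfun_step (p.drop i) c t hd
      generalize hkk : (match findSplit (p.drop i) 0 0 with | some s => s + 1 | none => 1) = k at hcut hR
      have hk1 : 1 ≤ k := by
        rw [← hkk]; cases findSplit (p.drop i) 0 0 <;> simp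
      have hu : PySem.List.slice p (some (i : Int)) (some ((i + k : Nat) : Int)) = (p.drop i).take k := by
        rw [PySem.List.slice_natCast]
        congr 1
        omega
      have huc : (p.drop i).take k = c :: t.take (k - 1) := by
        rw [hd]
        cases hk' : k with
        | zero => omega
        | succ k' => simp
      have hget0 : PySem.List.pyGet? ((p.drop i).take k) 0 = some c := by
        rw [huc]
        simp [PySem.List.pyGet?, PySem.List.pyIdx?]
      have hdk : (p.drop i).drop k = p.drop (i + k) := by
        rw [List.drop_drop]
      rw [hdk] at hR
      simp only [hcut, hu, hget0]
      by_cases hc : c = '('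
      · rw [if_pos (by rw [hc]), ih (i + k) (left ++ [(p.drop i).take k]) right (by omega)]
        rw [hR, if_pos hc]
        simp [flat_eq]
      · rw [if_neg (by simp [hc]),
          ih (i + k) (left ++ [[ '(' ]]) _ (by omega)]
        rw [hR, if_neg hc]
        simp [flat_eq, midFlip]
    · rw [if_neg hi]
      have hd : p.drop i = [] := by apply List.drop_eq_nil_of_le; omega
      rw [hd, Rfun]
      simp

theorem main_eq (l : List Char) : solutionA l = solBGo l l.length l.length 0 [] [] := by
  rw [solBGo_inv l l.length rfl l.length 0 [] [] (by omega)]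
  simp [PySem.Chars.join_nil, solutionA_eq_Rfun_fuel l.length l le_rfl]

-- ===== VERDICT (by name: the statement is the Claim_ definition above) =====
theorem solution_spec : Claim_equal_solution := by
  intro p _
  show solution p = solution_alt p
  unfold solution solution_alt
  exact congrArg String.mk (main_eq p.toList)
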